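-- pv_equiv track=rewrite | github.com/Ertan40/Python_Pandas | pandas_exercises/custom_exercises/13.extract_uppercase_words.py | extract_uppercase_words
-- ===== SOURCE A (Python) =====
-- def extract_uppercase_words(text):
--     result = []
--     current_word = ""
--
--     for char in text:
--         if char.isupper():  # Check if the character starts a new uppercase word
--             if current_word:  # If there is an existing word, add it to the result
--                 result.append(current_word.strip())
--             current_word = char  # Start a new word
--         else:
--             current_word += char  # Append the character to the current word
--
--     if current_word:  # Append the last word if any
--         result.append(current_word.strip())
--
--     return result
-- ===== SOURCE B (Python) =====
-- def extract_uppercase_words(text):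
--     idx = [i for i, c in enumerate(text) if c.isupper()]
--     bounds = [0] + idx + [len(text)]
--     raw = [text[bounds[k]:bounds[k + 1]] for k in range(len(bounds) - 1)]
--     return [r.strip() for r in raw if r]
-- ===== Notes on version B (the rewrite author's own statement) =====
-- stated objective: alternative
-- what changed: B replaces A's single-pass character accumulator (growing current_word, flushing on each uppercase) by a two-phase index/slice decomposition: collect the uppercase boundary indices, cut the text into raw slices between consecutive boundaries, then strip each non-empty raw slice.
import Mathlib
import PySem

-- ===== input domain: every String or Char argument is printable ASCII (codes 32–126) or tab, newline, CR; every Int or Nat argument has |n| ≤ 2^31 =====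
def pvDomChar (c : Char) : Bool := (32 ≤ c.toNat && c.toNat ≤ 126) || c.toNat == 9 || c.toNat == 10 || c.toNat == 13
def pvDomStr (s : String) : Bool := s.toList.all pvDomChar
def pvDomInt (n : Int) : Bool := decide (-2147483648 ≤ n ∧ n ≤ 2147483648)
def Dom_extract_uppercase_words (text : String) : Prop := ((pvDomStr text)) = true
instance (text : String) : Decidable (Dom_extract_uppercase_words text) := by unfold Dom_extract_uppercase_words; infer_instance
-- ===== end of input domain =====

-- B replaces A's single-pass character accumulator by a two-phase boundary-index/slice decomposition (alternative, same cost).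

-- ===== PORT A =====
-- state: (result, current_word); current_word kept as List Char
def pvStepA (st : List String × List Char) (c : Char) : List String × List Char :=
  if PySem.Chars.isupper c then
    (if st.2 ≠ [] then st.1 ++ [String.ofList (PySem.Chars.strip st.2)] else st.1, [c])
  else
    (st.1, st.2 ++ [c])

def extract_uppercase_words (text : String) : List String :=
  let st := text.toList.foldl pvStepA ([], [])
  if st.2 ≠ [] then st.1 ++ [String.ofList (PySem.Chars.strip st.2)] else st.1

-- ===== PORT B =====
def extract_uppercase_words_alt (text : String) : List String :=
  let cs := text.toList
  let idx : List Int := ((PySem.List.enumerate cs).filter (fun p => PySem.Chars.isupper p.2)).map (·.1)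
  let bounds : List Int := 0 :: idx ++ [(cs.length : Int)]
  let raw : List (List Char) := (List.range (bounds.length - 1)).map
    (fun k => PySem.List.slice cs (some (bounds.getD k 0)) (some (bounds.getD (k + 1) 0)))
  (raw.filter (fun r => r ≠ [])).map (fun r => String.ofList (PySem.Chars.strip r))

-- ===== PRECONDITION & SPEC =====
def Spec_extract_uppercase_words (text : String) (out : List String) : Prop := out = extract_uppercase_words_alt text
instance (text : String) (out : List String) : Decidable (Spec_extract_uppercase_words text out) := by unfold Spec_extract_uppercase_words; infer_instance

-- ===== CLAIM (what is proved, stated in full; the proofs are below) =====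
def Claim_equal_extract_uppercase_words : Prop := ∀ (text : String), Dom_extract_uppercase_words text → Spec_extract_uppercase_words text (extract_uppercase_words text)

-- ===== LEMMAS AND PROOFS =====

-- the raw segments A implicitly builds: split before every uppercase char
def pvSegs : List Char → List (List Char)
  | [] => [[]]
  | c :: rest =>
    match pvSegs rest with
    | s :: ss => if PySem.Chars.isupper c then [] :: (c :: s) :: ss else (c :: s) :: ss
    | [] => []

def pvPost (l : List (List Char)) : List String :=
  (l.filter (fun r => r ≠ [])).map (fun r => String.ofList (PySem.Chars.strip r))

def pvPrep (cur : List Char) : List (List Char) → List (List Char)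
  | [] => []
  | s :: ss => (cur ++ s) :: ss

-- uppercase positions, as Nats, built structurally
def pvUpN : List Char → List Nat
  | [] => []
  | c :: rest => (if PySem.Chars.isupper c then [0] else []) ++ (pvUpN rest).map (· + 1)

-- adjacent-bounds slicing, Nat form
def pvAdj (cs : List Char) : List Nat → List (List Char)
  | a :: b :: t => (cs.drop a).take (b - a) :: pvAdj cs (b :: t)
  | _ => []

lemma pvSegs_ne_nil (cs : List Char) : pvSegs cs ≠ [] := by
  induction cs with
  | nil => simp [pvSegs]
  | cons c rest ih =>
    cases h : pvSegs rest with
    | nil => exact absurd h ih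
    | cons s ss =>
      simp only [pvSegs, h]
      split <;> simp

lemma pvPost_cons (x : List Char) (ss : List (List Char)) :
    pvPost (x :: ss) = (if x ≠ [] then [String.ofList (PySem.Chars.strip x)] else []) ++ pvPost ss := by
  by_cases h : x = [] <;> simp [pvPost, h]

lemma pvA_loop (chars : List Char) : ∀ (res : List String) (cur : List Char),
    (let st := chars.foldl pvStepA (res, cur)
     if st.2 ≠ [] then st.1 ++ [String.ofList (PySem.Chars.strip st.2)] else st.1)
    = res ++ pvPost (pvPrep cur (pvSegs chars)) := by
  induction chars with
  | nil =>
    intro res cur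
    by_cases h : cur = [] <;> simp [pvSegs, pvPrep, pvPost, h]
  | cons c rest ih =>
    intro res cur
    obtain ⟨s, ss, hs⟩ : ∃ s ss, pvSegs rest = s :: ss := by
      cases h : pvSegs rest with
      | nil => exact absurd h (pvSegs_ne_nil rest)
      | cons s ss => exact ⟨s, ss, rfl⟩
    simp only [List.foldl_cons, pvStepA]
    by_cases hc : PySem.Chars.isupper c = true
    · simp only [hc, if_pos]
      rw [ih]
      simp only [pvSegs, hs, hc, if_true, pvPrep, List.append_nil]
      rw [pvPost_cons cur]
      by_cases h : cur = [] <;> simp [h, List.append_assoc]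
    · simp only [hc, if_false, Bool.false_eq_true]
      rw [ih]
      simp only [pvSegs, hs, hc, if_false, pvPrep, Bool.false_eq_true, List.append_assoc]
      rfl

lemma pvA_eq (text : String) :
    extract_uppercase_words text = pvPost (pvSegs text.toList) := by
  have h := pvA_loop text.toList [] []
  simp only [extract_uppercase_words]
  rw [h]
  obtain ⟨s, ss, hs⟩ : ∃ s ss, pvSegs text.toList = s :: ss := by
    cases h : pvSegs text.toList with
    | nil => exact absurd h (pvSegs_ne_nil _)
    | cons s ss => exact ⟨s, ss, rfl⟩
  simp [hs, pvPrep]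

-- shifting bounds by one strips the head character
lemma pvAdj_shift (c : Char) (cs : List Char) : ∀ (bs : List Nat),
    pvAdj (c :: cs) (bs.map (· + 1)) = pvAdj cs bs := by
  intro bs
  induction bs with
  | nil => rfl
  | cons a t ih =>
    cases t with
    | nil => rfl
    | cons b t' =>
      simp only [List.map_cons, pvAdj] at *
      rw [ih]
      congr 1
      simp [Nat.add_sub_add_right]

lemma pvUpN_append_len_ne_nil (cs : List Char) : pvUpN cs ++ [cs.length] ≠ [] := by
  simp

-- casting a shifted Nat list
lemma pvCastShift (s : Int) (L : List Nat) :
    (L.map (· + 1)).map (fun n : Nat => s + (n : Int)) = L.map (fun n : Nat => (s + 1) + (n : Int)) := by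
  rw [List.map_map]
  apply List.map_congr_left
  intro n _
  simp only [Function.comp_apply]
  push_cast
  ring

-- the enumerate/filter/map index list is pvUpN, cast to Int
lemma pvIdx_eq (cs : List Char) : ∀ (s : Int),
    (((PySem.List.enumerate cs s).filter (fun p => PySem.Chars.isupper p.2)).map (·.1))
    = (pvUpN cs).map (fun n : Nat => s + (n : Int)) := by
  induction cs with
  | nil => intro s; simp [PySem.List.enumerate_nil, pvUpN]
  | cons c rest ih =>
    intro s
    rw [PySem.List.enumerate_cons, List.filter_cons]
    by_cases hc : PySem.Chars.isupper c = true
    · simp only [hc, if_true, List.map_cons, ih (s + 1), pvUpN, List.cons_append,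
        List.nil_append, pvCastShift]
      simp
    · simp only [hc, Bool.false_eq_true, if_false, ih (s + 1), pvUpN, List.nil_append,
        pvCastShift]

-- the range/getD adjacent-pairs slicing equals pvAdj
lemma pvRangeAdj (cs : List Char) : ∀ (bs : List Nat) (a : Nat),
    (List.range bs.length).map
      (fun k => PySem.List.slice cs (some (((a :: bs).map (fun n : Nat => (n : Int))).getD k 0))
                                    (some (((a :: bs).map (fun n : Nat => (n : Int))).getD (k + 1) 0)))
    = pvAdj cs (a :: bs) := by
  intro bs
  induction bs with
  | nil => intro a; rfl
  | cons b t ih =>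
    intro a
    rw [List.length_cons, List.range_succ_eq_map, List.map_cons, List.map_map, pvAdj]
    congr 1
    · simp only [List.map_cons, List.getD_cons_zero, List.getD_cons_succ]
      exact PySem.List.slice_natCast cs a b
    · rw [← ih b]
      apply List.map_congr_left
      intro k _
      simp

-- the bounds list built by B, rewritten as a cast of the Nat bounds
lemma pvBounds_eq (cs : List Char) :
    (0 :: (((PySem.List.enumerate cs 0).filter (fun p => PySem.Chars.isupper p.2)).map (·.1))
       ++ [(cs.length : Int)])
    = (0 :: (pvUpN cs ++ [cs.length])).map (fun n : Nat => (n : Int)) := by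
  rw [pvIdx_eq cs 0]
  simp

-- main structural fact: slicing at the uppercase bounds yields exactly A's segments
lemma pvAdj_eq_segs (cs : List Char) :
    pvAdj cs (0 :: (pvUpN cs ++ [cs.length])) = pvSegs cs := by
  induction cs with
  | nil => simp [pvUpN, pvAdj, pvSegs]
  | cons c rest ih =>
    obtain ⟨s, ss, hs⟩ : ∃ s ss, pvSegs rest = s :: ss := by
      cases h : pvSegs rest with
      | nil => exact absurd h (pvSegs_ne_nil rest)
      | cons s ss => exact ⟨s, ss, rfl⟩
    obtain ⟨m, M, hM⟩ : ∃ m M, pvUpN rest ++ [rest.length] = m :: M := by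
      cases h : pvUpN rest ++ [rest.length] with
      | nil => exact absurd h (pvUpN_append_len_ne_nil rest)
      | cons m M => exact ⟨m, M, rfl⟩
    have ihM : (rest.take m) :: pvAdj rest (m :: M) = s :: ss := by
      have := ih
      rw [hM] at this
      simpa [pvAdj, hs] using this
    have h1 : rest.take m = s := (List.cons.injEq _ _ _ _ ▸ ihM).1
    have h2 : pvAdj rest (m :: M) = ss := (List.cons.injEq _ _ _ _ ▸ ihM).2
    have hmap : pvUpN (c :: rest) ++ [(c :: rest).length]
        = (if PySem.Chars.isupper c then [0] else []) ++ (m :: M).map (· + 1) := by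
      simp only [pvUpN, List.length_cons, List.append_assoc, ← hM]
      simp
    by_cases hc : PySem.Chars.isupper c = true
    · rw [hmap]
      simp only [hc, if_true, List.cons_append, List.nil_append, List.map_cons]
      rw [pvAdj, pvAdj]
      simp only [List.drop_zero, Nat.sub_zero, List.take_zero, List.take_succ_cons]
      have hsh := pvAdj_shift c rest (m :: M)
      simp only [List.map_cons] at hsh
      rw [hsh, h2]
      simp [pvSegs, hs, hc, h1]
    · rw [hmap]
      simp only [hc, Bool.false_eq_true, if_false, List.nil_append, List.map_cons]
      rw [pvAdj]
      simp only [List.drop_zero, Nat.sub_zero, List.take_succ_cons]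
      have hsh := pvAdj_shift c rest (m :: M)
      simp only [List.map_cons] at hsh
      rw [hsh, h2]
      simp [pvSegs, hs, hc, h1]

lemma pvB_eq (text : String) :
    extract_uppercase_words_alt text = pvPost (pvSegs text.toList) := by
  simp only [extract_uppercase_words_alt]
  rw [pvBounds_eq text.toList]
  have hlen : ((0 :: (pvUpN text.toList ++ [text.toList.length])).map (fun n : Nat => (n : Int))).length - 1
      = (pvUpN text.toList ++ [text.toList.length]).length := by simp
  rw [hlen, pvRangeAdj text.toList (pvUpN text.toList ++ [text.toList.length]) 0,
    pvAdj_eq_segs text.toList]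
  rfl

-- ===== VERDICT (by name: the statement is the Claim_ definition above) =====
theorem extract_uppercase_words_spec : Claim_equal_extract_uppercase_words := by
  intro text _
  unfold Spec_extract_uppercase_words
  rw [pvA_eq, pvB_eq]
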